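-- pv_equiv track=rewrite | github.com/SekaLudianto/kata-bendera | data/kotacari.py | is_possible_city
-- ===== SOURCE A (Python) =====
-- from collections import Counter
--
-- VOWELS = set("AEIOU")
--
-- def is_possible_city(scramble, city):
--     """
--     Scramble = huruf city + 3 vokal.
--     """
--     c_scramble = Counter(scramble)
--     c_city = Counter(city)
--
--     if len(scramble) != len(city) + 3:
--         return False
--
--     for letter, count in c_city.items():
--         if c_scramble[letter] < count:
--             return False
--
--     leftover = c_scramble - c_city
--     extra = list(leftover.elements())
--
--     return len(extra) == 3 and all(ch in VOWELS for ch in extra)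
-- ===== SOURCE B (Python) =====
-- VOWELS = set("AEIOU")
--
-- def is_possible_city(scramble, city):
--     extra = list(scramble)
--     for ch in city:
--         try:
--             extra.remove(ch)
--         except ValueError:
--             return False
--     return len(extra) == 3 and all(ch in VOWELS for ch in extra)
-- ===== Notes on version B (the rewrite author's own statement) =====
-- stated objective: simpler
-- what changed: Replaces Counter construction, the per-key count comparison and Counter subtraction/elements by a single pass that removes each city letter in place from a copy of scramble and then checks the 3 survivors are vowels.
import Mathlib
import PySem

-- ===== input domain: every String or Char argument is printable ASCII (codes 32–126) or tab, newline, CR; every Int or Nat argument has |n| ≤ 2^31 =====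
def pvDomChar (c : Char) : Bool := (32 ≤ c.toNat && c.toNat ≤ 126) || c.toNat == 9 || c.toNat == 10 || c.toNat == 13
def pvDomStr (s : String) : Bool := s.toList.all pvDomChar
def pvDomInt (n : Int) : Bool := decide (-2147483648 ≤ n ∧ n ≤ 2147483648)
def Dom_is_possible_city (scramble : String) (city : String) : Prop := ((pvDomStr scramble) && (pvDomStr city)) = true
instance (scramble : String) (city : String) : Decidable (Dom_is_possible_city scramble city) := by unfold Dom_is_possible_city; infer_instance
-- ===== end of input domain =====

-- B replaces Counters (build, compare, subtract, elements) by in-place removal of each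
-- city letter from a copy of scramble; objective: simpler (not faster).

-- ===== PORT A =====
def pyVOWELS : PySem.Set Char := PySem.Set.ofList "AEIOU".toList

-- hand port of collections.Counter.__sub__ (CPython: keep positive self-minus-other
-- counts in self's order, then negative counts from other-only keys); exact
def counterSub (a b : PySem.Dict Char Int) : PySem.Dict Char Int :=
  let r := a.items.foldl (fun (r : PySem.Dict Char Int) p =>
      let newcount := p.2 - b.getD p.1 0
      if 0 < newcount then r.insert p.1 newcount else r) PySem.Dict.empty
  b.items.foldl (fun (r : PySem.Dict Char Int) p =>
      if !(a.contains p.1) && decide (p.2 < 0) then r.insert p.1 (0 - p.2) else r) r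

-- hand port of Counter.elements(): each key repeated by its (positive) count, in order; exact
def counterElements (d : PySem.Dict Char Int) : List Char :=
  d.items.flatMap (fun p => List.replicate p.2.toNat p.1)

def is_possible_city (scramble : String) (city : String) : Bool :=
  let c_scramble := PySem.Dict.counter scramble.toList
  let c_city := PySem.Dict.counter city.toList
  if scramble.toList.length ≠ city.toList.length + 3 then false
  else if c_city.items.any (fun p => decide (c_scramble.getD p.1 0 < p.2)) then false
  else
    let leftover := counterSub c_scramble c_city
    let extra := counterElements leftover
    (extra.length == 3) && extra.all (fun ch => pyVOWELS.contains ch)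

-- ===== PORT B =====
-- the for-loop over city: extra.remove(ch), ValueError → return False
def removeAll : List Char → List Char → Option (List Char)
  | extra, [] => some extra
  | extra, c :: cs =>
      match PySem.List.remove? extra c with
      | none => none
      | some e => removeAll e cs

def is_possible_city_alt (scramble : String) (city : String) : Bool :=
  match removeAll scramble.toList city.toList with
  | none => false
  | some extra => (extra.length == 3) && extra.all (fun ch => pyVOWELS.contains ch)

-- ===== PRECONDITION & SPEC =====
def Spec_is_possible_city (scramble : String) (city : String) (out : Bool) : Prop := out = is_possible_city_alt scramble city
instance (scramble : String) (city : String) (out : Bool) : Decidable (Spec_is_possible_city scramble city out) := by unfold Spec_is_possible_city; infer_instance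

-- ===== CLAIM (what is proved, stated in full; the proofs are below) =====
def Claim_equal_is_possible_city : Prop := ∀ (scramble : String) (city : String), Dom_is_possible_city scramble city → Spec_is_possible_city scramble city (is_possible_city scramble city)

-- ===== LEMMAS AND PROOFS =====

theorem removeAll_some (t : List Char) : ∀ (s e : List Char), removeAll s t = some e →
    e.length + t.length = s.length ∧ ∀ c, e.count c + t.count c = s.count c := by
  induction t with
  | nil => intro s e h; simp [removeAll] at h; subst h; simp
  | cons c cs ih =>
    intro s e h
    unfold removeAll at h
    cases hrem : PySem.List.remove? s c with
    | none => rw [hrem] at h; simp at h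
    | some s' =>
      rw [hrem] at h
      have hcmem : c ∈ s := by
        by_contra hn
        rw [(PySem.List.remove?_eq_none_iff s c).mpr hn] at hrem; simp at hrem
      have hserase : s' = s.erase c := by
        have := PySem.List.remove?_eq_some_erase s c hcmem
        rw [this] at hrem; exact (Option.some.injEq _ _).mp hrem.symm
      subst hserase
      obtain ⟨hl, hcnt⟩ := ih _ _ h
      constructor
      · rw [List.length_erase_of_mem hcmem] at hl
        have : 1 ≤ s.length := List.length_pos_of_mem hcmem
        simp only [List.length_cons]; omega
      · intro c'
        have := hcnt c'
        by_cases hcc : c' = c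
        · subst hcc
          rw [List.count_erase_self] at this
          have hpos : 1 ≤ s.count c' := List.count_pos_iff.mpr hcmem
          simp only [List.count_cons_self]; omega
        · rw [List.count_erase_of_ne hcc] at this
          rw [List.count_cons_of_ne (Ne.symm hcc)]; omega

theorem removeAll_total (t : List Char) : ∀ (s : List Char),
    (∀ c, t.count c ≤ s.count c) → ∃ e, removeAll s t = some e := by
  induction t with
  | nil => intro s _; exact ⟨s, rfl⟩
  | cons c cs ih =>
    intro s hc
    have hcm : c ∈ s := by
      have := hc c
      simp only [List.count_cons_self] at this
      exact List.count_pos_iff.mp (by omega)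
    have hrem : PySem.List.remove? s c = some (s.erase c) :=
      PySem.List.remove?_eq_some_erase s c hcm
    obtain ⟨e, he⟩ := ih (s.erase c) (by
      intro c'
      have := hc c'
      by_cases hcc : c' = c
      · subst hcc
        rw [List.count_erase_self]
        simp only [List.count_cons_self] at this; omega
      · rw [List.count_erase_of_ne hcc]
        rw [List.count_cons_of_ne (Ne.symm hcc)] at this; omega)
    exact ⟨e, by unfold removeAll; rw [hrem]; exact he⟩

theorem foldl_noop {α β : Type} (f : β → α → β) (l : List α) (acc : β)
    (h : ∀ b a, a ∈ l → f b a = b) : l.foldl f acc = acc := by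
  induction l generalizing acc with
  | nil => rfl
  | cons x xs ih =>
    simp only [List.foldl_cons]
    rw [h acc x (by simp)]
    exact ih acc (fun b a ha => h b a (by simp [ha]))

theorem items_foldl_insert_if (g : Char → Int) (l : List Char) :
    ∀ (d : PySem.Dict Char Int), l.Nodup → d.keys.Nodup → (∀ k ∈ l, d.contains k = false) →
    (l.foldl (fun r k => if 0 < g k then r.insert k (g k) else r) d).items
      = d.items ++ (l.filter (fun k => decide (0 < g k))).map (fun k => (k, g k)) := by
  induction l with
  | nil => intro d _ _ _; simp
  | cons x xs ih =>
    intro d hnd hdk hfresh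
    simp only [List.foldl_cons]
    by_cases hx : 0 < g x
    · rw [if_pos hx]
      rw [ih (d.insert x (g x)) hnd.of_cons (PySem.Dict.nodup_keys_insert _ _ _ hdk)
        (fun k hk => by
          rw [PySem.Dict.contains_insert]
          have hne : k ≠ x := fun hkx => (List.nodup_cons.mp hnd).1 (hkx ▸ hk)
          simp [hne, hfresh k (by simp [hk])])]
      rw [PySem.Dict.items_insert, hfresh x (by simp)]
      simp [hx]
    · rw [if_neg hx]
      rw [ih d hnd.of_cons hdk (fun k hk => hfresh k (by simp [hk]))]
      simp [hx]

theorem count_flatMap_replicate (ps : List (Char × Int)) (c : Char) :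
    (ps.flatMap (fun p => List.replicate p.2.toNat p.1)).count c
      = (ps.map (fun p => if p.1 = c then p.2.toNat else 0)).sum := by
  induction ps with
  | nil => simp
  | cons p rest ih =>
    simp only [List.flatMap_cons, List.count_append, List.map_cons, List.sum_cons, ih,
      List.count_replicate]
    by_cases h : p.1 = c
    · simp [h]
    · simp [h, beq_iff_eq]

theorem sum_map_if_nodup (l : List Char) (hnd : l.Nodup) (g : Char → Nat) (c : Char) :
    (l.map (fun k => if k = c then g k else 0)).sum = if c ∈ l then g c else 0 := by
  induction l with
  | nil => simp
  | cons x xs ih =>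
    simp only [List.map_cons, List.sum_cons]
    by_cases h : x = c
    · subst h
      have : x ∉ xs := (List.nodup_cons.mp hnd).1
      rw [ih hnd.of_cons]
      simp [this]
    · rw [ih hnd.of_cons]
      by_cases hm : c ∈ xs <;> simp [h, Ne.symm h, hm]

theorem all_eq_of_perm {l l' : List Char} (h : l.Perm l') (f : Char → Bool) :
    l.all f = l'.all f := by
  cases hall : l'.all f
  · simp only [List.all_eq_false] at hall ⊢
    obtain ⟨x, hx, hfx⟩ := hall
    exact ⟨x, h.mem_iff.mpr hx, hfx⟩
  · simp only [List.all_eq_true] at hall ⊢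
    exact fun x hx => hall x (h.mem_iff.mp hx)

-- characterisation of A's extra-count under the availability condition
theorem extraA_count (s t : List Char) (c : Char) :
    ((counterSub (PySem.Dict.counter s) (PySem.Dict.counter t)).items.flatMap
        (fun p => List.replicate p.2.toNat p.1)).count c
      = (if c ∈ s ∧ (0:Int) < (s.count c : Int) - (t.count c : Int)
          then ((s.count c : Int) - (t.count c : Int)).toNat else 0) := by
  have hitems : (counterSub (PySem.Dict.counter s) (PySem.Dict.counter t)).items
      = ((PySem.Set.ofList s).filter
            (fun k => decide ((0:Int) < (s.count k : Int) - (t.count k : Int)))).map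
          (fun k => (k, (s.count k : Int) - (t.count k : Int))) := by
    unfold counterSub
    rw [foldl_noop _ _ _ (by
      intro r p hp
      rw [PySem.Dict.items_counter] at hp
      simp only [List.mem_map] at hp
      obtain ⟨k, _, hk⟩ := hp
      rw [← hk]
      simp)]
    rw [PySem.Dict.items_counter, List.foldl_map]
    have := items_foldl_insert_if
      (fun k => (s.count k : Int) - PySem.Dict.getD (PySem.Dict.counter t) k 0)
      (PySem.Set.ofList s) PySem.Dict.empty (PySem.Set.nodup_ofList s)
      (by simp [PySem.Dict.keys_empty]) (by simp [PySem.Dict.contains_empty])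
    simp only [PySem.Dict.getD_counter] at this ⊢
    simpa using this
  rw [hitems, count_flatMap_replicate, List.map_map]
  have hsum := sum_map_if_nodup
    ((PySem.Set.ofList s).filter
        (fun k => decide ((0:Int) < (s.count k : Int) - (t.count k : Int))))
    (List.Nodup.filter _ (PySem.Set.nodup_ofList s))
    (fun k => ((s.count k : Int) - (t.count k : Int)).toNat) c
  have : (((PySem.Set.ofList s).filter
        (fun k => decide ((0:Int) < (s.count k : Int) - (t.count k : Int)))).map
      ((fun p : Char × Int => if p.1 = c then p.2.toNat else 0) ∘
        (fun k => (k, (s.count k : Int) - (t.count k : Int))))).sum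
      = (((PySem.Set.ofList s).filter
        (fun k => decide ((0:Int) < (s.count k : Int) - (t.count k : Int)))).map
      (fun k => if k = c then ((s.count k : Int) - (t.count k : Int)).toNat else 0)).sum := by
    congr 1
  rw [this, hsum]
  by_cases hmem : c ∈ (PySem.Set.ofList s).filter
      (fun k => decide ((0:Int) < (s.count k : Int) - (t.count k : Int)))
  · have h1 := List.mem_filter.mp hmem
    rw [if_pos hmem, if_pos ⟨(PySem.Set.mem_ofList _ _).mp h1.1, by simpa using h1.2⟩]
  · rw [if_neg hmem, if_neg]
    intro ⟨h1, h2⟩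
    exact hmem (List.mem_filter.mpr ⟨(PySem.Set.mem_ofList _ _).mpr h1, by simpa using h2⟩)

-- ===== VERDICT (by name: the statement is the Claim_ definition above) =====
theorem is_possible_city_spec : Claim_equal_is_possible_city := by
  intro scramble city _
  unfold Spec_is_possible_city is_possible_city is_possible_city_alt
  set s := scramble.toList with hs
  set t := city.toList with ht
  by_cases hc : ∀ c, t.count c ≤ s.count c
  · -- every city letter is available: B succeeds, A's any-loop finds nothing
    obtain ⟨e, he⟩ := removeAll_total t s hc
    obtain ⟨hlen, hcnt⟩ := removeAll_some t s e he
    rw [he]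
    have hany : ((PySem.Dict.counter t).items.any
        (fun p => decide ((PySem.Dict.counter s).getD p.1 0 < p.2))) = false := by
      rw [List.any_eq_false]
      intro p hp
      rw [PySem.Dict.items_counter] at hp
      simp only [List.mem_map] at hp
      obtain ⟨k, _, hk⟩ := hp
      subst hk
      simp only [PySem.Dict.getD_counter, decide_eq_true_eq, not_lt]
      exact_mod_cast hc k
    -- A's extra is a permutation of B's extra
    have hperm : ((counterSub (PySem.Dict.counter s) (PySem.Dict.counter t)).items.flatMap
        (fun p => List.replicate p.2.toNat p.1)).Perm e := by
      rw [List.perm_iff_count]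
      intro c
      rw [extraA_count s t c]
      have h1 := hcnt c
      have h2 := hc c
      by_cases hmem : c ∈ s
      · have hspos : 0 < s.count c := List.count_pos_iff.mpr hmem
        by_cases hd : (0:Int) < (s.count c : Int) - (t.count c : Int)
        · rw [if_pos ⟨hmem, hd⟩]; omega
        · rw [if_neg (fun hh => hd hh.2)]
          have : s.count c ≤ t.count c := by exact_mod_cast (by omega : (s.count c : Int) ≤ t.count c)
          omega
      · rw [if_neg (fun hh => hmem hh.1)]
        have h0 : s.count c = 0 := List.count_eq_zero.mpr hmem
        omega
    by_cases hl : s.length ≠ t.length + 3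
    · rw [if_pos hl]
      have h3 : e.length ≠ 3 := by omega
      show false = ((e.length == 3) && e.all (fun ch => pyVOWELS.contains ch))
      simp [h3]
    · rw [if_neg hl, if_neg (by rw [hany]; exact Bool.false_ne_true)]
      show ((counterElements (counterSub (PySem.Dict.counter s) (PySem.Dict.counter t))).length == 3
            && (counterElements (counterSub (PySem.Dict.counter s) (PySem.Dict.counter t))).all
                (fun ch => pyVOWELS.contains ch))
          = ((e.length == 3) && e.all (fun ch => pyVOWELS.contains ch))
      unfold counterElements
      rw [hperm.length_eq, all_eq_of_perm hperm]
  · -- some city letter is missing: both sides return false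
    rw [not_forall] at hc
    simp only [not_le] at hc
    obtain ⟨k, hk⟩ := hc
    have hBnone : removeAll s t = none := by
      cases hAll : removeAll s t with
      | none => rfl
      | some e =>
        obtain ⟨_, hcnt⟩ := removeAll_some t s e hAll
        have := hcnt k; omega
    rw [hBnone]
    by_cases hl : s.length ≠ t.length + 3
    · rw [if_pos hl]
    · rw [if_neg hl]
      have hany : ((PySem.Dict.counter t).items.any
          (fun p => decide ((PySem.Dict.counter s).getD p.1 0 < p.2))) = true := by
        rw [List.any_eq_true]
        have hkt : k ∈ t := List.count_pos_iff.mp (by omega)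
        refine ⟨(k, (t.count k : Int)), ?_, ?_⟩
        · rw [PySem.Dict.items_counter]
          exact List.mem_map.mpr ⟨k, (PySem.Set.mem_ofList _ _).mpr hkt, rfl⟩
        · simp only [PySem.Dict.getD_counter, decide_eq_true_eq]
          exact_mod_cast hk
      rw [if_pos hany]
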